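-- pv_equiv track=rewrite | github.com/awrreny/deterministic-password-manager | python-cli-prototype/main.py | verify_policy
-- ===== SOURCE A (Python) =====
-- import string
--
-- def verify_policy(policy, password):
--     """
--     Verifies if the password meets the policy requirements.
--     Does not check length or character set as those are already enforced by the password generation.
--     """
--     if policy.get("requireUppercase") and not any(c.isupper() for c in password):
--         return False
--
--     if policy.get("requireLowercase") and not any(c.islower() for c in password):
--         return False
--
--     if policy.get("requireNumbers") and not any(c.isdigit() for c in password):
--         return False
--
--     if policy.get("requireSpecialChars") and not any(c in string.punctuation for c in password):
--         return False
--
--     return True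
-- ===== SOURCE B (Python) =====
-- import string
--
-- def verify_policy(policy, password):
--     has_upper = has_lower = has_digit = has_special = False
--     for c in password:
--         if c.isupper():
--             has_upper = True
--         if c.islower():
--             has_lower = True
--         if c.isdigit():
--             has_digit = True
--         if c in string.punctuation:
--             has_special = True
--     for key, flag in (("requireUppercase", has_upper),
--                       ("requireLowercase", has_lower),
--                       ("requireNumbers", has_digit),
--                       ("requireSpecialChars", has_special)):
--         if policy.get(key) and not flag:
--             return False
--     return True
-- ===== Notes on version B (the rewrite author's own statement) =====
-- stated objective: alternative
-- what changed: Replaced four guarded early-exit any() scans of the password with one single pass maintaining four character-class flags, followed by a uniform loop over (key, flag) requirement pairs.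
import Mathlib
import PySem

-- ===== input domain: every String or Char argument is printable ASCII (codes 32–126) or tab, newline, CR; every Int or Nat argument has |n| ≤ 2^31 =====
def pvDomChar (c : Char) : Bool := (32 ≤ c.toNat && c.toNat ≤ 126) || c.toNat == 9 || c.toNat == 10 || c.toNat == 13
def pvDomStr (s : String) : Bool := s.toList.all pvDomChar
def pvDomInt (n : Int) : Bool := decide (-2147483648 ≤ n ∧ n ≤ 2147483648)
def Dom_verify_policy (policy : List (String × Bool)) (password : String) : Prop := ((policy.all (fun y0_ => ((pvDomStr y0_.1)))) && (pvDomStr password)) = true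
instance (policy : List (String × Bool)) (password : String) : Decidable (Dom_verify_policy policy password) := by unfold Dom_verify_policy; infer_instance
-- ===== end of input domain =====

-- B replaces A's four guarded early-exit scans of the password with one single pass
-- maintaining four character-class flags, then checks the requirement pairs uniformly (alternative decomposition).


-- string.punctuation, shared constant
def pvPunct : List Char := "!\"#$%&'()*+,-./:;<=>?@[\\]^_`{|}~".toList

-- policy.get(k) read as a truthy Bool (missing key -> None -> falsy); assoc-list first-match lookup
def pvGet (policy : List (String × Bool)) (k : String) : Bool := (policy.lookup k).getD false

-- ===== PORT A =====
def verify_policy (policy : List (String × Bool)) (password : String) : Bool :=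
  if pvGet policy "requireUppercase" && !(password.toList.any PySem.Chars.isupper) then false
  else if pvGet policy "requireLowercase" && !(password.toList.any PySem.Chars.islower) then false
  else if pvGet policy "requireNumbers" && !(password.toList.any PySem.Chars.isdigit) then false
  else if pvGet policy "requireSpecialChars" && !(password.toList.any (fun c => pvPunct.contains c)) then false
  else true

-- ===== PORT B =====
-- single pass over the password maintaining the four flags
def pvFlags (cs : List Char) : Bool × Bool × Bool × Bool :=
  cs.foldl
    (fun f c =>
      ((f.1 || PySem.Chars.isupper c),
       (f.2.1 || PySem.Chars.islower c),
       (f.2.2.1 || PySem.Chars.isdigit c),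
       (f.2.2.2 || pvPunct.contains c)))
    (false, false, false, false)

-- uniform loop over (requirement key, flag) pairs
def pvCheckReqs (policy : List (String × Bool)) : List (String × Bool) → Bool
  | [] => true
  | (k, flag) :: rest => if pvGet policy k && !flag then false else pvCheckReqs policy rest

def verify_policy_alt (policy : List (String × Bool)) (password : String) : Bool :=
  let f := pvFlags password.toList
  pvCheckReqs policy
    [("requireUppercase", f.1), ("requireLowercase", f.2.1),
     ("requireNumbers", f.2.2.1), ("requireSpecialChars", f.2.2.2)]

-- ===== PRECONDITION & SPEC =====
def Spec_verify_policy (policy : List (String × Bool)) (password : String) (out : Bool) : Prop := out = verify_policy_alt policy password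
instance (policy : List (String × Bool)) (password : String) (out : Bool) : Decidable (Spec_verify_policy policy password out) := by unfold Spec_verify_policy; infer_instance

-- ===== CLAIM (what is proved, stated in full; the proofs are below) =====
def Claim_equal_verify_policy : Prop := ∀ (policy : List (String × Bool)) (password : String), Dom_verify_policy policy password → Spec_verify_policy policy password (verify_policy policy password)

-- ===== LEMMAS AND PROOFS =====

-- the single pass computes exactly the four any-scans
theorem pvFlags_eq (cs : List Char) :
    pvFlags cs = (cs.any PySem.Chars.isupper, cs.any PySem.Chars.islower,
                  cs.any PySem.Chars.isdigit, cs.any (fun c => pvPunct.contains c)) := by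
  have h : ∀ (cs : List Char) (a b c d : Bool),
      cs.foldl
        (fun f c =>
          ((f.1 || PySem.Chars.isupper c),
           (f.2.1 || PySem.Chars.islower c),
           (f.2.2.1 || PySem.Chars.isdigit c),
           (f.2.2.2 || pvPunct.contains c)))
        (a, b, c, d)
      = (a || cs.any PySem.Chars.isupper, b || cs.any PySem.Chars.islower,
         c || cs.any PySem.Chars.isdigit, d || cs.any (fun c => pvPunct.contains c)) := by
    intro cs
    induction cs with
    | nil => simp
    | cons x xs ih =>
      intro a b c d
      rw [List.foldl_cons, ih]
      simp [Bool.or_assoc]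
  simpa [pvFlags] using h cs false false false false

theorem verify_policy_spec : Claim_equal_verify_policy := by
  intro policy password _
  unfold Spec_verify_policy verify_policy verify_policy_alt
  rw [pvFlags_eq]
  simp only [pvCheckReqs]

-- ===== VERDICT (by name: the statement is the Claim_ definition above) =====
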